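-- pv_equiv track=rewrite | github.com/panchyni/gsNMF | FiguresModule.py | Get_Time_Idxs
-- ===== SOURCE A (Python) =====
-- def Get_Time_Idxs(time_labels):
--     '''
--
--     Turn specific text labels into a list of indexes for each label
--
--     '''
--
--     time_0d_idxs = []
--     time_8h_idxs = []
--     time_1d_idxs = []
--     time_3d_idxs = []
--     time_7d_idxs = []
--     time_8h_rm_idxs = []
--     time_1d_rm_idxs = []
--     time_3d_rm_idxs = []
--     for i in range(len(time_labels)):
--         if time_labels[i] == '0d':
--             time_0d_idxs.append(i)
--         elif time_labels[i] == '8h':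
--             time_8h_idxs.append(i)
--         elif time_labels[i] == '1d':
--             time_1d_idxs.append(i)
--         elif time_labels[i] == '3d':
--             time_3d_idxs.append(i)
--         elif time_labels[i] == '7d':
--             time_7d_idxs.append(i)
--         elif time_labels[i] == '8h_rm':
--             time_8h_rm_idxs.append(i)
--         elif time_labels[i] == '1d_rm':
--             time_1d_rm_idxs.append(i)
--         elif time_labels[i] == '3d_rm':
--             time_3d_rm_idxs.append(i)
--
--     return time_0d_idxs, time_8h_idxs, time_1d_idxs, time_3d_idxs, time_7d_idxs, time_8h_rm_idxs, time_1d_rm_idxs, time_3d_rm_idxs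
-- ===== SOURCE B (Python) =====
-- def Get_Time_Idxs(time_labels):
--     '''
--     Turn specific text labels into a list of indexes for each label
--     '''
--     pairs = list(enumerate(time_labels))
--     return tuple([i for i, l in pairs if l == lbl]
--                  for lbl in ('0d', '8h', '1d', '3d', '7d', '8h_rm', '1d_rm', '3d_rm'))
-- ===== Notes on version B (the rewrite author's own statement) =====
-- stated objective: idiomatic
-- what changed: Replaced the single index-loop that dispatches each element into one of eight mutable buckets with eight independent comprehension scans of enumerate(time_labels), one per label.
import Mathlib
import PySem

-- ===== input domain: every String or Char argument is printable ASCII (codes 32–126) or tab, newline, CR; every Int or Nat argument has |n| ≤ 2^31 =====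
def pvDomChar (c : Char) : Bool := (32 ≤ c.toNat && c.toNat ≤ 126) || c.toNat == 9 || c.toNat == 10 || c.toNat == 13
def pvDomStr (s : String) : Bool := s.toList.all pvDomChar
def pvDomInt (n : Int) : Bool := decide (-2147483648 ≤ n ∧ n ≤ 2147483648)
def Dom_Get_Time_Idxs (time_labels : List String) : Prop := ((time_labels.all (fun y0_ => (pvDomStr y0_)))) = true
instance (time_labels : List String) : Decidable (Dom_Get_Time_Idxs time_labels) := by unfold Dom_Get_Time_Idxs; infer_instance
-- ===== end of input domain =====

-- B replaces A's single bucketing dispatch loop with eight independent filtering scans of enumerate(time_labels) (idiomatic; same asymptotic cost).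


-- ===== PORT A =====
-- the if/elif chain of A's loop body, applied to the current accumulators, index i and label s
def pvStepA (acc : List Int × List Int × List Int × List Int × List Int × List Int × List Int × List Int)
    (i : Int) (s : String) :
    List Int × List Int × List Int × List Int × List Int × List Int × List Int × List Int :=
  let (a0, a1, a2, a3, a4, a5, a6, a7) := acc
  if s == "0d" then (a0 ++ [i], a1, a2, a3, a4, a5, a6, a7)
  else if s == "8h" then (a0, a1 ++ [i], a2, a3, a4, a5, a6, a7)
  else if s == "1d" then (a0, a1, a2 ++ [i], a3, a4, a5, a6, a7)
  else if s == "3d" then (a0, a1, a2, a3 ++ [i], a4, a5, a6, a7)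
  else if s == "7d" then (a0, a1, a2, a3, a4 ++ [i], a5, a6, a7)
  else if s == "8h_rm" then (a0, a1, a2, a3, a4, a5 ++ [i], a6, a7)
  else if s == "1d_rm" then (a0, a1, a2, a3, a4, a5, a6 ++ [i], a7)
  else if s == "3d_rm" then (a0, a1, a2, a3, a4, a5, a6, a7 ++ [i])
  else (a0, a1, a2, a3, a4, a5, a6, a7)


-- for i in range(len(time_labels)): dispatch time_labels[i] ("" default never read: i is always in range)
def Get_Time_Idxs (time_labels : List String) : List Int × List Int × List Int × List Int × List Int × List Int × List Int × List Int :=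
  (PySem.List.pyRange 0 (PySem.List.len time_labels) 1).foldl
    (fun acc i => pvStepA acc i (PySem.List.pyGetD time_labels i ""))
    ([], [], [], [], [], [], [], [])

-- ===== PORT B =====
-- one comprehension of B: [i for i, l in pairs if l == lbl]
def pvPick (pairs : List (Int × String)) (lbl : String) : List Int :=
  (pairs.filter (fun p => p.2 == lbl)).map (fun p => p.1)

def Get_Time_Idxs_alt (time_labels : List String) : List Int × List Int × List Int × List Int × List Int × List Int × List Int × List Int :=
  let pairs := PySem.List.enumerate time_labels
  (pvPick pairs "0d", pvPick pairs "8h", pvPick pairs "1d", pvPick pairs "3d",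
   pvPick pairs "7d", pvPick pairs "8h_rm", pvPick pairs "1d_rm", pvPick pairs "3d_rm")

-- ===== PRECONDITION & SPEC =====
def Spec_Get_Time_Idxs (time_labels : List String) (out : List Int × List Int × List Int × List Int × List Int × List Int × List Int × List Int) : Prop := out = Get_Time_Idxs_alt time_labels
instance (time_labels : List String) (out : List Int × List Int × List Int × List Int × List Int × List Int × List Int × List Int) : Decidable (Spec_Get_Time_Idxs time_labels out) := by
  unfold Spec_Get_Time_Idxs
  have h : DecidableEq (List Int) := inferInstance
  exact @instDecidableEqProd _ _ h (@instDecidableEqProd _ _ h (@instDecidableEqProd _ _ h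
    (@instDecidableEqProd _ _ h (@instDecidableEqProd _ _ h (@instDecidableEqProd _ _ h
    (@instDecidableEqProd _ _ h h)))))) _ _

-- ===== CLAIM (what is proved, stated in full; the proofs are below) =====
def Claim_equal_Get_Time_Idxs : Prop := ∀ (time_labels : List String), Dom_Get_Time_Idxs time_labels → Spec_Get_Time_Idxs time_labels (Get_Time_Idxs time_labels)

-- ===== LEMMAS AND PROOFS =====
theorem pick_cons (p : Int × String) (l : List (Int × String)) (lbl : String) :
    pvPick (p :: l) lbl = (if p.2 == lbl then [p.1] else []) ++ pvPick l lbl := by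
  simp [pvPick, List.filter_cons]; split_ifs <;> simp

theorem foldl_range_eq_foldl_enumerate (xs pre : List String)
    (acc : List Int × List Int × List Int × List Int × List Int × List Int × List Int × List Int) :
    (PySem.List.pyRange (pre.length : Int) ((pre.length : Int) + (xs.length : Int)) 1).foldl
      (fun acc i => pvStepA acc i (PySem.List.pyGetD (pre ++ xs) i ""))
      acc
    = (PySem.List.enumerate xs (pre.length : Int)).foldl (fun acc p => pvStepA acc p.1 p.2) acc := by
  induction xs generalizing pre acc with
  | nil => simp [PySem.List.pyRange_one_eq_nil, PySem.List.enumerate_nil]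
  | cons x xs ih =>
    rw [PySem.List.pyRange_one_cons (by simp only [List.length_cons]; push_cast; omega)]
    simp only [PySem.List.enumerate_cons, List.foldl_cons]
    have hget : PySem.List.pyGetD (pre ++ x :: xs) (pre.length : Int) "" = x := by
      rw [PySem.List.pyGetD_natCast]
      simp
    rw [hget]
    rw [show ((pre.length : Int) + ((x :: xs).length : Int)) = (((pre ++ [x]).length : Int) + (xs.length : Int)) by simp only [List.length_cons, List.length_append, List.length_nil]; push_cast; omega]
    rw [show ((pre.length : Int) + 1) = ((pre ++ [x]).length : Int) by simp]
    have := ih (pre ++ [x]) (pvStepA acc (pre.length : Int) x)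
    simpa [List.append_assoc] using this

set_option maxHeartbeats 1600000 in
theorem foldl_step_eq_picks (l : List (Int × String))
    (acc : List Int × List Int × List Int × List Int × List Int × List Int × List Int × List Int) :
    l.foldl (fun acc p => pvStepA acc p.1 p.2) acc
    = (acc.1 ++ pvPick l "0d", acc.2.1 ++ pvPick l "8h", acc.2.2.1 ++ pvPick l "1d",
       acc.2.2.2.1 ++ pvPick l "3d", acc.2.2.2.2.1 ++ pvPick l "7d", acc.2.2.2.2.2.1 ++ pvPick l "8h_rm",
       acc.2.2.2.2.2.2.1 ++ pvPick l "1d_rm", acc.2.2.2.2.2.2.2 ++ pvPick l "3d_rm") := by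
  induction l generalizing acc with
  | nil => simp [pvPick]
  | cons p l ih =>
    rw [List.foldl_cons, ih]
    obtain ⟨a0, a1, a2, a3, a4, a5, a6, a7⟩ := acc
    simp only [pvStepA, pick_cons]
    split_ifs with h0 h1 h2 h3 h4 h5 h6 h7 <;>
      simp_all [List.append_assoc]

-- ===== VERDICT (by name: the statement is the Claim_ definition above) =====
theorem Get_Time_Idxs_spec : Claim_equal_Get_Time_Idxs := by
  intro xs _
  show Get_Time_Idxs xs = Get_Time_Idxs_alt xs
  unfold Get_Time_Idxs Get_Time_Idxs_alt
  have h := foldl_range_eq_foldl_enumerate xs [] ([], [], [], [], [], [], [], [])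
  simp only [List.length_nil, Nat.cast_zero, List.nil_append, zero_add] at h
  rw [PySem.List.len_eq, h, foldl_step_eq_picks]
  simp
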